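-- pv_equiv track=rewrite | github.com/AlDracuX/ArkhamMirror-Nova | packages/arkham-shard-bundle/arkham_shard_bundle/compiler.py | assign_page_numbers
-- ===== SOURCE A (Python) =====
-- def assign_page_numbers(documents: list[dict]) -> list[dict]:
--     """
--     Assign continuous page numbers to an ordered list of documents.
--
--     Each document dict must have 'page_count' (int). Returns a new list
--     with 'bundle_page_start' and 'bundle_page_end' added.
--
--     Pure function -- no database access.
--
--     Args:
--         documents: List of dicts with at least 'page_count' key.
--
--     Returns:
--         New list of dicts with page assignments added.
--     """
--     result = []
--     current_page = 1
--     for doc in documents: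
--         page_count = doc.get("page_count", 1)
--         if page_count < 1:
--             page_count = 1
--         numbered = {
--             **doc,
--             "bundle_page_start": current_page,
--             "bundle_page_end": current_page + page_count - 1,
--         }
--         result.append(numbered)
--         current_page += page_count
--     return result
-- ===== SOURCE B (Python) =====
-- def assign_page_numbers(documents: list[dict]) -> list[dict]:
--     """Assign continuous page numbers via a precomputed prefix-sum table of starts."""
--     counts = [max(doc.get("page_count", 1), 1) for doc in documents]
--     starts = [1]
--     for c in counts:
--         starts.append(starts[-1] + c)
--     return [
--         {**doc, "bundle_page_start": s, "bundle_page_end": s + c - 1}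
--         for doc, s, c in zip(documents, starts, counts)
--     ]
-- ===== Notes on version B (the rewrite author's own statement) =====
-- stated objective: alternative
-- what changed: Replaces the single loop threading a mutable current_page accumulator by a three-phase pipeline: map out the clamped page counts, build a prefix-sum table of start pages, then emit the numbered dicts in one zip comprehension.
import Mathlib
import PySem

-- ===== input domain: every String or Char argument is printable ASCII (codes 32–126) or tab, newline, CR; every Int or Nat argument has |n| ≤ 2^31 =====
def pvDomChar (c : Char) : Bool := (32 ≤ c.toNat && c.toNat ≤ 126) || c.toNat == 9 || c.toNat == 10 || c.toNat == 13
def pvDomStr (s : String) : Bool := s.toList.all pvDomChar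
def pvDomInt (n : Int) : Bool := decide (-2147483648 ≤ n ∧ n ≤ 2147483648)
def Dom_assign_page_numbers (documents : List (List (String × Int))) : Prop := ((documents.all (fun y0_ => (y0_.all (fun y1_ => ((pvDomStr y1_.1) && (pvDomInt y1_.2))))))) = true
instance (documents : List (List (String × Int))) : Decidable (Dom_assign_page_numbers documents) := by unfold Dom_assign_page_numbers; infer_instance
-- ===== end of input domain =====

-- B replaces A's single accumulator loop by a counts map, a prefix-sum starts table and one zip comprehension (alternative decomposition, same cost).

-- ===== PORT A =====
-- A: one loop threading (result, current_page).
def assign_page_numbers (documents : List (List (String × Int))) : List (List (String × Int)) :=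
  (documents.foldl
    (fun (st : List (List (String × Int)) × Int) doc =>
      let page_count0 := (PySem.Dict.mk doc).getD "page_count" 1
      let page_count := if page_count0 < 1 then 1 else page_count0
      let numbered :=
        (((PySem.Dict.mk doc).insert "bundle_page_start" st.2).insert
          "bundle_page_end" (st.2 + page_count - 1)).items
      (st.1 ++ [numbered], st.2 + page_count))
    ([], 1)).1

-- ===== PORT B =====
-- B: counts map, prefix-sum starts table, one zip comprehension.
def assign_page_numbers_alt (documents : List (List (String × Int))) : List (List (String × Int)) :=
  let counts := documents.map (fun doc => max ((PySem.Dict.mk doc).getD "page_count" 1) 1)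
  let starts := counts.foldl (fun (s : List Int) c => s ++ [PySem.List.pyGetD s (-1) 0 + c]) [1]
  (documents.zip (starts.zip counts)).map
    (fun p =>
      (((PySem.Dict.mk p.1).insert "bundle_page_start" p.2.1).insert
        "bundle_page_end" (p.2.1 + p.2.2 - 1)).items)

-- ===== PRECONDITION & SPEC =====
def Spec_assign_page_numbers (documents : List (List (String × Int))) (out : List (List (String × Int))) : Prop := out = assign_page_numbers_alt documents
instance (documents : List (List (String × Int))) (out : List (List (String × Int))) : Decidable (Spec_assign_page_numbers documents out) := by unfold Spec_assign_page_numbers; infer_instance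

-- ===== CLAIM (what is proved, stated in full; the proofs are below) =====
def Claim_equal_assign_page_numbers : Prop := ∀ (documents : List (List (String × Int))), Dom_assign_page_numbers documents → Spec_assign_page_numbers documents (assign_page_numbers documents)

-- ===== LEMMAS AND PROOFS =====

/-- Clamped page count of one document. -/
def pvClamp (doc : List (String × Int)) : Int :=
  max ((PySem.Dict.mk doc).getD "page_count" 1) 1

/-- The numbered dict for one document at start page `cp`. -/
def pvNumbered (doc : List (String × Int)) (cp : Int) : List (String × Int) :=
  (((PySem.Dict.mk doc).insert "bundle_page_start" cp).insert
    "bundle_page_end" (cp + pvClamp doc - 1)).items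

/-- Common reference result starting at page `cp`. -/
def pvRef : List (List (String × Int)) → Int → List (List (String × Int))
  | [], _ => []
  | doc :: rest, cp => pvNumbered doc cp :: pvRef rest (cp + pvClamp doc)

/-- Prefix-sum scan of starts. -/
def pvScan : Int → List Int → List Int
  | cp, [] => [cp]
  | cp, c :: cs => cp :: pvScan (cp + c) cs

theorem pvClamp_eq_ite (doc : List (String × Int)) :
    pvClamp doc = (if (PySem.Dict.mk doc).getD "page_count" 1 < 1 then 1
                   else (PySem.Dict.mk doc).getD "page_count" 1) := by
  unfold pvClamp; split <;> omega

theorem foldA_eq (documents : List (List (String × Int)))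
    (acc : List (List (String × Int))) (cp : Int) :
    documents.foldl
      (fun (st : List (List (String × Int)) × Int) doc =>
        let page_count0 := (PySem.Dict.mk doc).getD "page_count" 1
        let page_count := if page_count0 < 1 then 1 else page_count0
        let numbered :=
          (((PySem.Dict.mk doc).insert "bundle_page_start" st.2).insert
            "bundle_page_end" (st.2 + page_count - 1)).items
        (st.1 ++ [numbered], st.2 + page_count))
      (acc, cp)
    = (acc ++ pvRef documents cp, cp + (documents.map pvClamp).sum) := by
  induction documents generalizing acc cp with
  | nil => simp [pvRef]
  | cons doc rest ih =>
    simp only [List.foldl_cons, List.map_cons, List.sum_cons, pvRef]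
    rw [ih]
    rw [← pvClamp_eq_ite]
    refine Prod.ext ?_ (by ring)
    simp [pvNumbered]

theorem foldScan_eq (cs : List Int) (pre : List Int) (cp : Int) :
    (cs.foldl (fun (s : List Int) c => s ++ [PySem.List.pyGetD s (-1) 0 + c]) (pre ++ [cp]))
      = pre ++ pvScan cp cs := by
  induction cs generalizing pre cp with
  | nil => simp [pvScan]
  | cons c cs ih =>
    simp only [List.foldl_cons, pvScan]
    rw [PySem.List.pyGetD_neg_one_append_singleton]
    rw [show pre ++ [cp] ++ [cp + c] = (pre ++ [cp]) ++ [cp + c] from rfl]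
    rw [ih (pre ++ [cp]) (cp + c)]
    simp

theorem zip_eq_ref (documents : List (List (String × Int))) (cp : Int) :
    (documents.zip ((pvScan cp (documents.map pvClamp)).zip (documents.map pvClamp))).map
      (fun p =>
        (((PySem.Dict.mk p.1).insert "bundle_page_start" p.2.1).insert
          "bundle_page_end" (p.2.1 + p.2.2 - 1)).items)
    = pvRef documents cp := by
  induction documents generalizing cp with
  | nil => simp [pvRef]
  | cons doc rest ih =>
    simp only [List.map_cons, pvScan, List.zip_cons_cons, pvRef]
    rw [ih]
    rfl

theorem alt_eq_ref (documents : List (List (String × Int))) :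
    assign_page_numbers_alt documents = pvRef documents 1 := by
  unfold assign_page_numbers_alt
  have h := foldScan_eq (documents.map (fun doc => max ((PySem.Dict.mk doc).getD "page_count" 1) 1)) [] 1
  simp only [List.nil_append] at h
  simp only [h]
  have hm : documents.map (fun doc => max ((PySem.Dict.mk doc).getD "page_count" 1) 1)
      = documents.map pvClamp := rfl
  rw [hm]
  exact zip_eq_ref documents 1

-- ===== VERDICT (by name: the statement is the Claim_ definition above) =====
theorem assign_page_numbers_spec : Claim_equal_assign_page_numbers := by
  intro documents _
  unfold Spec_assign_page_numbers
  rw [alt_eq_ref]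
  unfold assign_page_numbers
  rw [foldA_eq]
  simp
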